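-- pv_equiv track=rewrite | github.com/AlejandroGlezSan/music_maker | compositor/scales.py | generate_narrative_path
-- ===== SOURCE A (Python) =====
-- def generate_narrative_path(length_bars=8):
--     """
--     Crea una curva de tensión armónica para una 'historia' musical.
--     Sigue el arco clásico: Inicio -> Conflicto -> Clímax -> Resolución.
--     """
--     # Mapa de tensión: 0 (reposo) a 1 (tensión máxima)
--     path = []
--     for i in range(length_bars):
--         progress = i / length_bars
--         if progress < 0.25:
--             path.append('tonic') # Inicio tranquilo
--         elif progress < 0.5:
--             path.append('subdominant') # Empezamos a caminar
--         elif progress < 0.75: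
--             path.append('dominant') # Tensión máxima (Clímax)
--         else:
--             path.append('tonic') # Resolución final
--     return path
-- ===== SOURCE B (Python) =====
-- def generate_narrative_path(length_bars=8):
--     """Build the arc as four blocks: segment lengths come from ceiling divisions,
--     then the list is concatenated replication -- no per-bar threshold test."""
--     n = length_bars
--     if n <= 0:
--         return []
--     b1 = -(-n // 4)          # bars with progress < 0.25
--     b2 = -(-n // 2)          # bars with progress < 0.5
--     b3 = -(-(3 * n) // 4)    # bars with progress < 0.75
--     return (['tonic'] * b1 + ['subdominant'] * (b2 - b1)
--             + ['dominant'] * (b3 - b2) + ['tonic'] * (n - b3))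
-- ===== Notes on version B (the rewrite author's own statement) =====
-- stated objective: alternative
-- what changed: Instead of looping over bars and classifying each progress float with an if/elif ladder, B computes the four segment lengths in closed form with ceiling divisions and concatenates four replicated blocks.
import Mathlib
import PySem

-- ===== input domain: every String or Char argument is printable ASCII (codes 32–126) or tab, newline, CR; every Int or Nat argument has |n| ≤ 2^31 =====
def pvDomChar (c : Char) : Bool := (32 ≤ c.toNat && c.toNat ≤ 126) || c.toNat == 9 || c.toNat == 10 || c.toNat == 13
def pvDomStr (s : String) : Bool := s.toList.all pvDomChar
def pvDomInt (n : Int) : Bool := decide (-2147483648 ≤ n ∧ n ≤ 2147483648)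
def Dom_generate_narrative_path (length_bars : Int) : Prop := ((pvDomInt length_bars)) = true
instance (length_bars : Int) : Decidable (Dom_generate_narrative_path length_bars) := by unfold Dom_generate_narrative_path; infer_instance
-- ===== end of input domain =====

-- B computes the four segment lengths by ceiling division and concatenates replicated blocks,
-- instead of A's per-bar if/elif classification (alternative decomposition, same cost).


-- ===== PORT A =====
-- A compares the float i/length_bars against 0.25, 0.5, 0.75. For 0 ≤ i < length_bars ≤ 2^31
-- these float comparisons are exact (the thresholds are powers of two; i/length_bars can only
-- round onto a threshold when it equals it), so 'i/n < 0.25' is ported exactly as '4*i < n', etc.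
def generate_narrative_path (length_bars : Int) : List String :=
  (PySem.List.pyRange 0 length_bars 1).foldl (fun path i =>
    path ++ [if 4 * i < length_bars then "tonic"
             else if 2 * i < length_bars then "subdominant"
             else if 4 * i < 3 * length_bars then "dominant"
             else "tonic"]) []

-- ===== PORT B =====
-- Source B's '-(-x // k)' ceiling divisions, Python '//' = PySem.Int.floordiv; list*k = replicate (toNat clamps
-- negatives to [], exactly as Python's list repetition does).
def generate_narrative_path_alt (length_bars : Int) : List String :=
  if length_bars ≤ 0 then []
  else
    let b1 := -(PySem.Int.floordiv (-length_bars) 4)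
    let b2 := -(PySem.Int.floordiv (-length_bars) 2)
    let b3 := -(PySem.Int.floordiv (-(3 * length_bars)) 4)
    List.replicate b1.toNat "tonic" ++ List.replicate (b2 - b1).toNat "subdominant"
      ++ List.replicate (b3 - b2).toNat "dominant" ++ List.replicate (length_bars - b3).toNat "tonic"

-- ===== PRECONDITION & SPEC =====
def Spec_generate_narrative_path (length_bars : Int) (out : List String) : Prop := out = generate_narrative_path_alt length_bars
instance (length_bars : Int) (out : List String) : Decidable (Spec_generate_narrative_path length_bars out) := by unfold Spec_generate_narrative_path; infer_instance

-- ===== CLAIM (what is proved, stated in full; the proofs are below) =====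
def Claim_equal_generate_narrative_path : Prop := ∀ (length_bars : Int), Dom_generate_narrative_path length_bars → Spec_generate_narrative_path length_bars (generate_narrative_path length_bars)

-- ===== LEMMAS AND PROOFS =====

-- a map over pyRange that is constant on the range is a replicate
theorem pv_map_const_range {f : Int → String} {a b : Int} (c : String)
    (h : ∀ x, a ≤ x → x < b → f x = c) :
    (PySem.List.pyRange a b 1).map f = List.replicate (b - a).toNat c := by
  rw [List.eq_replicate_iff]
  constructor
  · simp [PySem.List.length_pyRange_one]
  · intro s hs
    obtain ⟨x, hx, rfl⟩ := List.mem_map.mp hs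
    obtain ⟨h1, h2⟩ := (PySem.List.mem_pyRange_one ..).mp hx
    exact h x h1 h2

-- ===== VERDICT (by name: the statement is the Claim_ definition above) =====
theorem generate_narrative_path_spec : Claim_equal_generate_narrative_path := by
  intro n _
  unfold Spec_generate_narrative_path generate_narrative_path generate_narrative_path_alt
  rw [PySem.List.foldl_append_singleton_eq_map]
  by_cases hn : n ≤ 0
  · simp [hn, PySem.List.pyRange_one_eq_nil hn]
  · push_neg at hn
    simp only [if_neg (not_le.mpr hn)]
    set f : Int → String := fun i =>
      if 4 * i < n then "tonic"
      else if 2 * i < n then "subdominant"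
      else if 4 * i < 3 * n then "dominant"
      else "tonic" with hf
    set b1 := -(PySem.Int.floordiv (-n) 4) with hb1
    set b2 := -(PySem.Int.floordiv (-n) 2) with hb2
    set b3 := -(PySem.Int.floordiv (-(3 * n)) 4) with hb3
    have k1 : (b1 - 1) * 4 < n ∧ n ≤ b1 * 4 :=
      (PySem.Int.neg_floordiv_neg_eq_iff_of_pos (by norm_num)).mp hb1.symm
    have k2 : (b2 - 1) * 2 < n ∧ n ≤ b2 * 2 :=
      (PySem.Int.neg_floordiv_neg_eq_iff_of_pos (by norm_num)).mp hb2.symm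
    have k3 : (b3 - 1) * 4 < 3 * n ∧ 3 * n ≤ b3 * 4 :=
      (PySem.Int.neg_floordiv_neg_eq_iff_of_pos (by norm_num)).mp hb3.symm
    have o1 : (0:Int) ≤ b1 := by omega
    have o2 : b1 ≤ b2 := by omega
    have o3 : b2 ≤ b3 := by omega
    have o4 : b3 ≤ n := by omega
    rw [PySem.List.pyRange_one_append 0 b1 n o1 (by omega),
        PySem.List.pyRange_one_append b1 b2 n o2 (by omega),
        PySem.List.pyRange_one_append b2 b3 n o3 o4,
        List.map_append, List.map_append, List.map_append]
    rw [pv_map_const_range (f := f) "tonic" (fun x h1 h2 => by simp only [hf]; split_ifs <;> first | rfl | omega),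
        pv_map_const_range (f := f) "subdominant" (fun x h1 h2 => by simp only [hf]; split_ifs <;> first | rfl | omega),
        pv_map_const_range (f := f) "dominant" (fun x h1 h2 => by simp only [hf]; split_ifs <;> first | rfl | omega),
        pv_map_const_range (f := f) "tonic" (fun x h1 h2 => by simp only [hf]; split_ifs <;> first | rfl | omega)]
    norm_num
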